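-- pv_equiv track=rewrite | github.com/dioptec273/Structure | structure donne/P2_1/P2_1.py | somme_elements_distincts
-- ===== SOURCE A (Python) =====
-- def somme_elements_distincts(tab1, tab2):
--     somme = 0
--
--     # Parcours du premier tableau
--     for i in range(len(tab1)):
--         trouve = False
--         for j in range(len(tab2)):
--             if tab1[i] == tab2[j]:
--                 trouve = True
--                 break
--         if not trouve:
--             somme += tab1[i]
--
--     # Parcours du deuxième tableau
--     for i in range(len(tab2)):
--         trouve = False
--         for j in range(len(tab1)):
--             if tab2[i] == tab1[j]:
--                 trouve = True
--                 break
--         if not trouve: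
--             somme += tab2[i]
--
--     return somme
-- ===== SOURCE B (Python) =====
-- def somme_elements_distincts(tab1, tab2):
--     # Two count tables over distinct values; sum value*count once per distinct value.
--     c1 = {}
--     for x in tab1:
--         c1[x] = c1.get(x, 0) + 1
--     c2 = {}
--     for x in tab2:
--         c2[x] = c2.get(x, 0) + 1
--     somme = 0
--     for v, n in c1.items():
--         if v not in c2:
--             somme += v * n
--     for v, n in c2.items():
--         if v not in c1:
--             somme += v * n
--     return somme
-- ===== Notes on version B (the rewrite author's own statement) =====
-- stated objective: alternative
-- what changed: Replaces A's per-element nested membership scans (quadratic inner index loops) with two hash count tables keyed on distinct values, summing value*count once per distinct value absent from the other table.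
import Mathlib
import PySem

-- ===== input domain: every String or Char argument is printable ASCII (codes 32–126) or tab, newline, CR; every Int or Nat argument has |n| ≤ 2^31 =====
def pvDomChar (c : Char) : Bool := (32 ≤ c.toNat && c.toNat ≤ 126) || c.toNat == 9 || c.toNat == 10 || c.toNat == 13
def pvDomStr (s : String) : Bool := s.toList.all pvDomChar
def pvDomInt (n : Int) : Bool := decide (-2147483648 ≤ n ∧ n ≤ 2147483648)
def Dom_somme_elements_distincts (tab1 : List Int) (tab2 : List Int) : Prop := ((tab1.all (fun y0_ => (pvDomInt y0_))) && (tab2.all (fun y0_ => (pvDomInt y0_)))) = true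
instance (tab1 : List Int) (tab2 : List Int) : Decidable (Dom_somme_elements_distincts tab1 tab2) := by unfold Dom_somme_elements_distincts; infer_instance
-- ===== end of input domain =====

-- B replaces A's per-element nested membership scans by two count tables keyed on
-- distinct values (sum value*count once per distinct value); objective: alternative.

-- ===== PORT A =====
-- inner loop 'for j in range(len(tab2)): if tab1[i] == tab2[j]: trouve = True; break'
def pvScanA (x : Int) (ys : List Int) : List Int → Bool
  | [] => false
  | j :: js => if PySem.List.pyGetD ys j 0 = x then true else pvScanA x ys js

def somme_elements_distincts (tab1 : List Int) (tab2 : List Int) : Int :=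
  let somme : Int := (PySem.List.pyRange 0 tab1.length 1).foldl
    (fun somme i =>
      let trouve := pvScanA (PySem.List.pyGetD tab1 i 0) tab2
        (PySem.List.pyRange 0 tab2.length 1)
      if ¬ trouve then somme + PySem.List.pyGetD tab1 i 0 else somme) 0
  (PySem.List.pyRange 0 tab2.length 1).foldl
    (fun somme i =>
      let trouve := pvScanA (PySem.List.pyGetD tab2 i 0) tab1
        (PySem.List.pyRange 0 tab1.length 1)
      if ¬ trouve then somme + PySem.List.pyGetD tab2 i 0 else somme) somme

-- ===== PORT B =====
def somme_elements_distincts_alt (tab1 : List Int) (tab2 : List Int) : Int :=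
  let c1 : PySem.Dict Int Int :=
    tab1.foldl (fun d x => d.insert x (d.getD x 0 + 1)) PySem.Dict.empty
  let c2 : PySem.Dict Int Int :=
    tab2.foldl (fun d x => d.insert x (d.getD x 0 + 1)) PySem.Dict.empty
  let somme : Int :=
    c1.items.foldl (fun somme vn => if ¬ c2.contains vn.1 then somme + vn.1 * vn.2 else somme) 0
  c2.items.foldl (fun somme vn => if ¬ c1.contains vn.1 then somme + vn.1 * vn.2 else somme) somme

-- ===== PRECONDITION & SPEC =====
def Spec_somme_elements_distincts (tab1 : List Int) (tab2 : List Int) (out : Int) : Prop := out = somme_elements_distincts_alt tab1 tab2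
instance (tab1 : List Int) (tab2 : List Int) (out : Int) : Decidable (Spec_somme_elements_distincts tab1 tab2 out) := by unfold Spec_somme_elements_distincts; infer_instance

-- ===== CLAIM (what is proved, stated in full; the proofs are below) =====
def Claim_equal_somme_elements_distincts : Prop := ∀ (tab1 : List Int) (tab2 : List Int), Dom_somme_elements_distincts tab1 tab2 → Spec_somme_elements_distincts tab1 tab2 (somme_elements_distincts tab1 tab2)

-- ===== LEMMAS AND PROOFS =====

-- A's inner loop over indices is membership of x in ys.
lemma pvScanA_eq_any (x : Int) (ys : List Int) (js : List Int) :
    pvScanA x ys js = (js.map (fun j => PySem.List.pyGetD ys j 0)).any (· == x) := by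
  induction js with
  | nil => rfl
  | cons j js ih => by_cases h : PySem.List.pyGetD ys j 0 = x <;> simp [pvScanA, h, ih]

lemma pvScanA_full (x : Int) (ys : List Int) :
    pvScanA x ys (PySem.List.pyRange 0 ys.length 1) = decide (x ∈ ys) := by
  rw [pvScanA_eq_any, PySem.List.map_pyGetD_pyRange_zero']
  by_cases h : x ∈ ys
  · simp only [h, decide_true]
    exact List.any_eq_true.mpr ⟨x, h, by simp⟩
  · simp only [h, decide_false]
    refine List.any_eq_false.mpr (fun y hy => ?_)
    simp only [beq_iff_eq]
    rintro rfl
    exact h hy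

-- an accumulate-if loop is the sum of f over the kept elements
lemma pv_foldl_if_not_sum {α : Type} (q : α → Bool) (f : α → Int) (xs : List α) (init : Int) :
    xs.foldl (fun s x => if ¬ q x then s + f x else s) init
      = init + ((xs.filter (fun x => ! q x)).map f).sum := by
  induction xs generalizing init with
  | nil => simp
  | cons a l ih =>
    rw [List.foldl_cons]
    by_cases h : q a = true
    · rw [if_neg (by simp [h]), ih]
      simp [h]
    · rw [if_pos (by simp [h]), ih]
      simp [h, add_assoc]

-- summing v * count v over the distinct values kept by p is summing the kept elements
lemma pv_sum_dedup_count (xs : List Int) (p : Int → Bool) :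
    (((PySem.List.dedup xs).filter p).map (fun v => v * (xs.count v : Int))).sum
      = (xs.filter p).sum := by
  have hnd : ((PySem.List.dedup xs).filter p).Nodup := (PySem.List.nodup_dedup xs).filter _
  rw [← List.sum_toFinset _ hnd]
  have hset : ((PySem.List.dedup xs).filter p).toFinset = (xs.filter p).toFinset := by
    ext a
    simp [and_comm]
  rw [hset, Finset.sum_list_count (xs.filter p)]
  refine Finset.sum_congr rfl (fun a ha => ?_)
  have hpa : p a = true := by
    have := List.mem_toFinset.mp ha
    exact (List.mem_filter.mp this).2
  rw [List.count_filter]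
  simp [mul_comm]
  exact hpa

-- A computes sum of tab1-elements not in tab2 plus sum of tab2-elements not in tab1
lemma pvA_eq (tab1 tab2 : List Int) :
    somme_elements_distincts tab1 tab2
      = (tab1.filter (fun x => ! decide (x ∈ tab2))).sum
        + (tab2.filter (fun x => ! decide (x ∈ tab1))).sum := by
  unfold somme_elements_distincts
  dsimp only
  simp only [pvScanA_full]
  rw [PySem.List.foldl_pyRange_zero_pyGetD' tab1 0
      (fun s x => if ¬ decide (x ∈ tab2) = true then s + x else s) 0,
      PySem.List.foldl_pyRange_zero_pyGetD' tab2 0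
      (fun s x => if ¬ decide (x ∈ tab1) = true then s + x else s)]
  rw [pv_foldl_if_not_sum, pv_foldl_if_not_sum]
  simp [List.map_id']

-- B computes the same two sums via its count tables
lemma pvB_eq (tab1 tab2 : List Int) :
    somme_elements_distincts_alt tab1 tab2
      = (tab1.filter (fun x => ! decide (x ∈ tab2))).sum
        + (tab2.filter (fun x => ! decide (x ∈ tab1))).sum := by
  unfold somme_elements_distincts_alt
  simp only [PySem.Dict.foldl_insert_getD_add_one_eq_counter, PySem.Dict.items_counter,
    PySem.Dict.contains_counter]
  rw [List.foldl_map, List.foldl_map]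
  rw [pv_foldl_if_not_sum, pv_foldl_if_not_sum]
  rw [← PySem.List.dedup_eq_ofList, ← PySem.List.dedup_eq_ofList]
  simp only [List.contains_eq_mem]
  rw [pv_sum_dedup_count tab1 (fun v => ! decide (v ∈ tab2)),
      pv_sum_dedup_count tab2 (fun v => ! decide (v ∈ tab1))]
  ring

-- ===== VERDICT (by name: the statement is the Claim_ definition above) =====
theorem somme_elements_distincts_spec : Claim_equal_somme_elements_distincts := by
  intro tab1 tab2 _
  unfold Spec_somme_elements_distincts
  rw [pvA_eq, pvB_eq]
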